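-- pv_equiv track=rewrite | github.com/YosubShin/m2sv | freeze_blueprint.py | choose_per_place_counts
-- ===== SOURCE A (Python) =====
-- from typing import List, Optional, Dict
--
-- def choose_per_place_counts(total: int, places: List[str], cap: Optional[int]) -> List[int]:
--     n = len(places)
--     base = total // n
--     counts = [base] * n
--     remainder = total - base * n
--     for i in range(remainder):
--         counts[i % n] += 1
--     if cap is not None:
--         counts = [min(c, cap) for c in counts]
--     # If capped caused deficit, fill round-robin where possible
--     deficit = total - sum(counts)
--     i = 0
--     while deficit > 0 and any((cap is None or counts[j] < cap) for j in range(n)):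
--         if cap is None or counts[i % n] < cap:
--             counts[i % n] += 1
--             deficit -= 1
--         i += 1
--     return counts
-- ===== SOURCE B (Python) =====
-- from typing import List, Optional
--
-- def choose_per_place_counts(total: int, places: List[str], cap: Optional[int]) -> List[int]:
--     n = len(places)
--     # slot i gets ceil((total - i) / n), a closed form for round-robin distribution
--     counts = [(total - i + n - 1) // n for i in range(n)]
--     if cap is None:
--         return counts
--     return [min(c, cap) for c in counts]
-- ===== Notes on version B (the rewrite author's own statement) =====
-- stated objective: simpler
-- what changed: Replaces A's mutating round-robin fill loop and its never-executing cap-deficit repair while-loop with a direct per-slot closed form counts[i] = (total - i + n - 1) // n plus an optional capping map; the repair loop is provably a no-op because whenever capping creates a deficit every slot already equals the cap.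
import Mathlib
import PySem

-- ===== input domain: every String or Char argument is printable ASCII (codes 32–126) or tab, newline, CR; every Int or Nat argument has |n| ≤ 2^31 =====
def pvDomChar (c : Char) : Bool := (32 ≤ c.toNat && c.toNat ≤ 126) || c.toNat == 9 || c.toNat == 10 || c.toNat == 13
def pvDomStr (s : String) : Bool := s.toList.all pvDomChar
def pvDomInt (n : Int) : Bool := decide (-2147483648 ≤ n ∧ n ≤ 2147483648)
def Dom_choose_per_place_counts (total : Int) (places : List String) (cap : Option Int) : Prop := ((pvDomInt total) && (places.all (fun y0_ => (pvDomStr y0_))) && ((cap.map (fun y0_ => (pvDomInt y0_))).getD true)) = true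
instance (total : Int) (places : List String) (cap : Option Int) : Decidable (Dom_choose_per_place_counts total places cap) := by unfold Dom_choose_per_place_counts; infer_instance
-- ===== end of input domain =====

-- B replaces A's mutating fill loop and its provably dead cap-deficit repair loop by a
-- per-slot closed form (total - i + n - 1) // n followed by an optional cap; objective: simpler.


-- ===== PORT A =====
-- A's trailing `while deficit > 0 and any(...)` loop, transliterated with a fuel bound.
-- The fuel passed at the call site (deficit.toNat * (n+1) + n + 1) always suffices: within
-- any n+1 consecutive iterations either deficit decreases or the guard has turned false.

def pvDeficitLoop (cap : Option Int) (n : Nat) : Nat → Int → Int → List Int → List Int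
  | 0, _, _, cs => cs
  | fuel+1, deficit, i, cs =>
    if 0 < deficit ∧ ((PySem.List.pyRange 0 (n : Int) 1).any (fun j =>
        match cap with
        | none => true
        | some c => decide (PySem.List.pyGetD cs j 0 < c))) = true then
      match cap with
      | none =>
          pvDeficitLoop cap n fuel (deficit - 1) (i + 1)
            (PySem.List.pySetD cs (PySem.Int.mod i (n : Int))
              (PySem.List.pyGetD cs (PySem.Int.mod i (n : Int)) 0 + 1))
      | some c =>
          if PySem.List.pyGetD cs (PySem.Int.mod i (n : Int)) 0 < c then
            pvDeficitLoop cap n fuel (deficit - 1) (i + 1)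
              (PySem.List.pySetD cs (PySem.Int.mod i (n : Int))
                (PySem.List.pyGetD cs (PySem.Int.mod i (n : Int)) 0 + 1))
          else
            pvDeficitLoop cap n fuel deficit (i + 1) cs
    else cs

def choose_per_place_counts (total : Int) (places : List String) (cap : Option Int) : List Int :=
  let n : Int := (places.length : Int)
  let base : Int := PySem.Int.floordiv total n
  let counts : List Int := List.replicate places.length base
  let remainder : Int := total - base * n
  let counts : List Int :=
    (PySem.List.pyRange 0 remainder 1).foldl (fun cs i =>
      PySem.List.pySetD cs (PySem.Int.mod i n)
        (PySem.List.pyGetD cs (PySem.Int.mod i n) 0 + 1)) counts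
  let counts : List Int :=
    match cap with
    | none => counts
    | some c => counts.map (fun x => min x c)
  let deficit : Int := total - counts.sum
  pvDeficitLoop cap places.length (deficit.toNat * (places.length + 1) + places.length + 1)
    deficit 0 counts

-- ===== PORT B =====
def choose_per_place_counts_alt (total : Int) (places : List String) (cap : Option Int) : List Int :=
  let n : Int := (places.length : Int)
  let counts : List Int :=
    (PySem.List.pyRange 0 n 1).map (fun i => PySem.Int.floordiv (total - i + n - 1) n)
  match cap with
  | none => counts
  | some c => counts.map (fun x => min x c)


-- ===== PRECONDITION & SPEC =====
-- Pre_ excludes exactly places = [], where A raises ZeroDivisionError (total // 0).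
def Pre_choose_per_place_counts (total : Int) (places : List String) (cap : Option Int) : Prop :=
  places ≠ []
instance (total : Int) (places : List String) (cap : Option Int) : Decidable (Pre_choose_per_place_counts total places cap) := by unfold Pre_choose_per_place_counts; infer_instance

def pvWitness_choose_per_place_counts : Int × List String × Option Int := (7, ["a", "b", "c"], some 3)

def Spec_choose_per_place_counts (total : Int) (places : List String) (cap : Option Int) (out : List Int) : Prop := out = choose_per_place_counts_alt total places cap
instance (total : Int) (places : List String) (cap : Option Int) (out : List Int) : Decidable (Spec_choose_per_place_counts total places cap out) := by unfold Spec_choose_per_place_counts; infer_instance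

-- ===== CLAIM (what is proved, stated in full; the proofs are below) =====
def Claim_equal_choose_per_place_counts : Prop := ∀ (total : Int) (places : List String) (cap : Option Int), Dom_choose_per_place_counts total places cap → Pre_choose_per_place_counts total places cap → Spec_choose_per_place_counts total places cap (choose_per_place_counts total places cap)

-- ===== LEMMAS AND PROOFS =====

theorem pv_fill_loop (base : Int) (n k : Nat) (hk : k ≤ n) :
    (PySem.List.pyRange 0 (k : Int) 1).foldl (fun cs i =>
      PySem.List.pySetD cs (PySem.Int.mod i (n : Int))
        (PySem.List.pyGetD cs (PySem.Int.mod i (n : Int)) 0 + 1)) (List.replicate n base)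
    = List.replicate k (base + 1) ++ List.replicate (n - k) base := by
  induction k with
  | zero => simp [PySem.List.pyRange_one_eq_nil]
  | succ k ih =>
      have hkn : k < n := hk
      have h1 : ((k + 1 : Nat) : Int) = (k : Int) + 1 := by push_cast; ring
      rw [h1, PySem.List.pyRange_one_succ_right (by exact_mod_cast Nat.zero_le k),
        List.foldl_append, ih (le_of_lt hkn)]
      have hmod : PySem.Int.mod ((k : Nat) : Int) ((n : Nat) : Int) = ((k : Nat) : Int) := by
        simp [Nat.mod_eq_of_lt hkn]
      simp only [List.foldl_cons, List.foldl_nil, hmod, PySem.List.pySetD_natCast,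
        PySem.List.pyGetD_natCast]
      have hnk : n - k = (n - (k + 1)) + 1 := by omega
      rw [List.getD_eq_getElem?_getD, List.getElem?_append_right (by simp), hnk]
      simp only [List.length_replicate, Nat.sub_self, List.replicate_succ,
        List.getElem?_cons_zero, Option.getD_some]
      rw [List.set_append_right _ _ (by simp)]
      simp only [List.length_replicate, Nat.sub_self, List.set_cons_zero]
      rw [show ((base + 1) :: List.replicate k (base + 1) : List Int)
            = List.replicate (k + 1) (base + 1) from (List.replicate_succ).symm,
        List.replicate_succ', List.append_assoc]
      simp

theorem pv_closed_form (total : Int) (n : Nat) (hn : 0 < n) :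
    (PySem.List.pyRange 0 (n : Int) 1).map
      (fun i => PySem.Int.floordiv (total - i + (n : Int) - 1) (n : Int))
    = List.replicate (total - PySem.Int.floordiv total n * n).toNat
        (PySem.Int.floordiv total n + 1)
      ++ List.replicate (n - (total - PySem.Int.floordiv total n * n).toNat)
        (PySem.Int.floordiv total n) := by
  have hpos : (0 : Int) < (n : Int) := by exact_mod_cast hn
  have hdm := PySem.Int.floordiv_mul_add_mod total (n : Int)
  have hr0 : 0 ≤ PySem.Int.mod total (n : Int) := PySem.Int.mod_nonneg total hpos
  have hrn : PySem.Int.mod total (n : Int) < (n : Int) := PySem.Int.mod_lt total hpos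
  set b := PySem.Int.floordiv total (n : Int) with hb
  set r := total - b * (n : Int) with hr
  have hreq : r = PySem.Int.mod total (n : Int) := by omega
  have hrt : ((r.toNat : Nat) : Int) = r := Int.toNat_of_nonneg (by omega)
  have hrtn : r.toNat ≤ n := by omega
  apply List.ext_getElem
  · simp [PySem.List.length_pyRange_one]
    omega
  · intro j hj1 hj2
    have hjn : j < n := by
      simpa [PySem.List.length_pyRange_one] using hj1
    have hjn' : ((j : Nat) : Int) < (n : Int) := by exact_mod_cast hjn
    rw [List.getElem_map, PySem.List.getElem_pyRange_one]
    by_cases hcase : j < r.toNat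
    · rw [List.getElem_append_left (by simpa using hcase)]
      simp only [List.getElem_replicate]
      rw [PySem.Int.floordiv_eq_iff_of_pos hpos]
      constructor
      · have : ((j : Nat) : Int) < r := by omega
        nlinarith
      · nlinarith [Int.natCast_nonneg j]
    · rw [List.getElem_append_right (by simpa using hcase)]
      simp only [List.getElem_replicate]
      rw [PySem.Int.floordiv_eq_iff_of_pos hpos]
      have : r ≤ ((j : Nat) : Int) := by omega
      constructor
      · nlinarith
      · nlinarith

theorem pv_loop_noop (cap : Option Int) (n fuel : Nat) (deficit i : Int) (cs : List Int)
    (h : ¬ (0 < deficit ∧ ((PySem.List.pyRange 0 (n : Int) 1).any (fun j =>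
        match cap with
        | none => true
        | some c => decide (PySem.List.pyGetD cs j 0 < c))) = true)) :
    pvDeficitLoop cap n fuel deficit i cs = cs := by
  cases fuel with
  | zero => rfl
  | succ m => simp only [pvDeficitLoop, if_neg h]

theorem pv_sum_canon (b r : Int) (n : Nat) (h0 : 0 ≤ r) (h1 : r ≤ (n : Int)) :
    (List.replicate r.toNat (b + 1) ++ List.replicate (n - r.toNat) b).sum
      = b * (n : Int) + r := by
  have hrt : ((r.toNat : Nat) : Int) = r := Int.toNat_of_nonneg h0
  have hle : r.toNat ≤ n := by omega
  rw [List.sum_append, List.sum_replicate, List.sum_replicate, nsmul_eq_mul, nsmul_eq_mul]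
  push_cast [hle]
  rw [hrt]
  ring

theorem pv_getD_replicate_pair (c : Int) (a m : Nat) (j : Int) (h0 : 0 ≤ j)
    (hj : j < ((a + m : Nat) : Int)) :
    PySem.List.pyGetD (List.replicate a c ++ List.replicate m c) j 0 = c := by
  rw [PySem.List.pyGetD_eq_getElem _ _ h0 (by simpa using hj)]
  by_cases h : j.toNat < a
  · rw [List.getElem_append_left (by simpa using h)]
    simp
  · rw [List.getElem_append_right (by simpa using not_lt.mp h)]
    simp

theorem pv_main (total : Int) (places : List String) (cap : Option Int)
    (hpre : places ≠ []) :
    choose_per_place_counts total places cap = choose_per_place_counts_alt total places cap := by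
  have hn : 0 < places.length := List.length_pos_of_ne_nil hpre
  have hpos : (0 : Int) < (places.length : Int) := by exact_mod_cast hn
  have hdm := PySem.Int.floordiv_mul_add_mod total (places.length : Int)
  have hr0 : 0 ≤ total - PySem.Int.floordiv total (places.length : Int) * (places.length : Int) := by
    have := PySem.Int.mod_nonneg total hpos; omega
  have hrn : total - PySem.Int.floordiv total (places.length : Int) * (places.length : Int)
      < (places.length : Int) := by
    have := PySem.Int.mod_lt total hpos; omega
  have hrt : (((total - PySem.Int.floordiv total (places.length : Int) * (places.length : Int)).toNat : Nat) : Int)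
      = total - PySem.Int.floordiv total (places.length : Int) * (places.length : Int) :=
    Int.toNat_of_nonneg hr0
  have hfill : (PySem.List.pyRange 0 (total - PySem.Int.floordiv total (places.length : Int) * (places.length : Int)) 1).foldl
      (fun cs i => PySem.List.pySetD cs (PySem.Int.mod i (places.length : Int))
        (PySem.List.pyGetD cs (PySem.Int.mod i (places.length : Int)) 0 + 1))
      (List.replicate places.length (PySem.Int.floordiv total (places.length : Int)))
      = List.replicate (total - PySem.Int.floordiv total (places.length : Int) * (places.length : Int)).toNat
          (PySem.Int.floordiv total (places.length : Int) + 1)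
        ++ List.replicate (places.length - (total - PySem.Int.floordiv total (places.length : Int) * (places.length : Int)).toNat)
          (PySem.Int.floordiv total (places.length : Int)) := by
    conv_lhs => rw [← hrt]
    exact pv_fill_loop _ _ _ (by omega)
  have hsum := pv_sum_canon (PySem.Int.floordiv total (places.length : Int))
      (total - PySem.Int.floordiv total (places.length : Int) * (places.length : Int))
      places.length hr0 (le_of_lt hrn)
  cases cap with
  | none =>
      simp only [choose_per_place_counts, choose_per_place_counts_alt]
      rw [hfill, pv_closed_form total places.length hn]
      have h0 : total - (List.replicate (total - PySem.Int.floordiv total (places.length : Int) * (places.length : Int)).toNat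
          (PySem.Int.floordiv total (places.length : Int) + 1)
        ++ List.replicate (places.length - (total - PySem.Int.floordiv total (places.length : Int) * (places.length : Int)).toNat)
          (PySem.Int.floordiv total (places.length : Int))).sum = 0 := by
        rw [hsum]; ring
      rw [h0]
      exact pv_loop_noop _ _ _ _ _ _ (by simp)
  | some c =>
      simp only [choose_per_place_counts, choose_per_place_counts_alt]
      rw [hfill, pv_closed_form total places.length hn]
      rw [List.map_append, List.map_replicate, List.map_replicate]
      by_cases hc : c ≤ PySem.Int.floordiv total (places.length : Int)
      · rw [min_eq_right (by omega), min_eq_right hc]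
        apply pv_loop_noop
        rintro ⟨-, hany⟩
        rw [List.any_eq_true] at hany
        obtain ⟨j, hjmem, hjp⟩ := hany
        rw [PySem.List.mem_pyRange_one] at hjmem
        have : PySem.List.pyGetD
            (List.replicate (total - PySem.Int.floordiv total (places.length : Int) * (places.length : Int)).toNat c
              ++ List.replicate (places.length - (total - PySem.Int.floordiv total (places.length : Int) * (places.length : Int)).toNat) c)
            j 0 = c := by
          apply pv_getD_replicate_pair _ _ _ _ hjmem.1
          push_cast
          omega
        simp only [this] at hjp
        exact absurd (of_decide_eq_true hjp) (lt_irrefl c)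
      · rw [min_eq_left (by omega), min_eq_left (by omega)]
        have h0 : total - (List.replicate (total - PySem.Int.floordiv total (places.length : Int) * (places.length : Int)).toNat
            (PySem.Int.floordiv total (places.length : Int) + 1)
          ++ List.replicate (places.length - (total - PySem.Int.floordiv total (places.length : Int) * (places.length : Int)).toNat)
            (PySem.Int.floordiv total (places.length : Int))).sum = 0 := by
          rw [hsum]; ring
        rw [h0]
        exact pv_loop_noop _ _ _ _ _ _ (by simp)

-- ===== VERDICT (by name: the statement is the Claim_ definition above) =====
theorem choose_per_place_counts_spec : Claim_equal_choose_per_place_counts := by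
  intro total places cap _hdom hpre
  unfold Spec_choose_per_place_counts
  exact pv_main total places cap hpre
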